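-- pv_equiv track=rewrite | github.com/SoroushZiaee/Web-scraping-tab.com | web_scrape_tab_com_au.py | _convert_one_hot_result
-- ===== SOURCE A (Python) =====
-- def _convert_one_hot_result(sample_list: list):
--     final_result = []
--     for item in sample_list:
--         if item[0] == item[1]:
--             final_result.append([0, 1, 0])
--
--         elif item[0] > item[1]:
--             final_result.append([1, 0, 0])
--
--         else:
--             final_result.append([0, 0, 1])
--
--     return final_result
-- ===== SOURCE B (Python) =====
-- def _convert_one_hot_result(sample_list: list):
--     # Column-wise construction: three staged passes build the gt/eq/lt indicator
--     # columns, then a zip transposes them into the per-item one-hot rows.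
--     gt = [int(item[0] > item[1]) for item in sample_list]
--     eq = [int(item[0] == item[1]) for item in sample_list]
--     lt = [int(item[0] < item[1]) for item in sample_list]
--     return [[g, e, l] for g, e, l in zip(gt, eq, lt)]
-- ===== Notes on version B (the rewrite author's own statement) =====
-- stated objective: alternative
-- what changed: Builds the result column-wise: three staged passes compute the greater/equal/less indicator columns as 0/1 lists, and a final zip transposes them into the one-hot rows, replacing A's single row-wise if/elif/else accumulator loop.
-- outside the precondition, e.g. on _convert_one_hot_result([[1]]): A raises IndexError, B raises IndexError
import Mathlib
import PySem

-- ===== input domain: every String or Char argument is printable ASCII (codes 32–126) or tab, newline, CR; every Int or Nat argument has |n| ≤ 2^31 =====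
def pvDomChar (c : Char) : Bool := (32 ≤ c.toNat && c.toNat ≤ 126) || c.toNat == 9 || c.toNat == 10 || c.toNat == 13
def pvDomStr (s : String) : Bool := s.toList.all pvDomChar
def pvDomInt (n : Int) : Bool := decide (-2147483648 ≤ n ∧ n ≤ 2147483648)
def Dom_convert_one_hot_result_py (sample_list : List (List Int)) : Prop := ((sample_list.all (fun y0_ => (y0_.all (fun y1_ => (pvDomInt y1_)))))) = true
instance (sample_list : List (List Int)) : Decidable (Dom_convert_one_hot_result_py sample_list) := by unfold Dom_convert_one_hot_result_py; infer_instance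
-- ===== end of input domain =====

-- B builds the result column-wise (three staged indicator passes, then a zip transpose)
-- instead of A's row-wise if/elif/else accumulator loop (objective: alternative).

-- ===== PORT A =====
-- item[0] / item[1] via PySem.List.pyGet?; Pre_ guarantees both indices are in range,
-- so the .getD 0 default is never taken on admitted inputs.
def convert_one_hot_result_py (sample_list : List (List Int)) : List (List Int) :=
  sample_list.foldl (fun final_result item =>
    let a := (PySem.List.pyGet? item 0).getD 0
    let b := (PySem.List.pyGet? item 1).getD 0
    if a = b then final_result ++ [[0, 1, 0]]
    else if a > b then final_result ++ [[1, 0, 0]]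
    else final_result ++ [[0, 0, 1]]) []

-- ===== PORT B =====
def convert_one_hot_result_py_alt (sample_list : List (List Int)) : List (List Int) :=
  let gt := sample_list.map (fun item =>
    if (PySem.List.pyGet? item 0).getD 0 > (PySem.List.pyGet? item 1).getD 0 then (1:Int) else 0)
  let eq := sample_list.map (fun item =>
    if (PySem.List.pyGet? item 0).getD 0 = (PySem.List.pyGet? item 1).getD 0 then (1:Int) else 0)
  let lt := sample_list.map (fun item =>
    if (PySem.List.pyGet? item 0).getD 0 < (PySem.List.pyGet? item 1).getD 0 then (1:Int) else 0)
  (gt.zip (eq.zip lt)).map (fun p => [p.1, p.2.1, p.2.2])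

-- ===== PRECONDITION & SPEC =====
-- Pre_ excludes items of length < 2, on which Python A raises IndexError.
def Pre_convert_one_hot_result_py (sample_list : List (List Int)) : Prop :=
  ∀ item ∈ sample_list, 2 ≤ item.length
instance (sample_list : List (List Int)) : Decidable (Pre_convert_one_hot_result_py sample_list) := by unfold Pre_convert_one_hot_result_py; infer_instance

def pvWitness_convert_one_hot_result_py : List (List Int) := [[1, 2], [3, 3], [5, 0]]

def Spec_convert_one_hot_result_py (sample_list : List (List Int)) (out : List (List Int)) : Prop := out = convert_one_hot_result_py_alt sample_list
instance (sample_list : List (List Int)) (out : List (List Int)) : Decidable (Spec_convert_one_hot_result_py sample_list out) := by unfold Spec_convert_one_hot_result_py; infer_instance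

-- ===== CLAIM (what is proved, stated in full; the proofs are below) =====
def Claim_equal_convert_one_hot_result_py : Prop := ∀ (sample_list : List (List Int)), Dom_convert_one_hot_result_py sample_list → Pre_convert_one_hot_result_py sample_list → Spec_convert_one_hot_result_py sample_list (convert_one_hot_result_py sample_list)

-- ===== LEMMAS AND PROOFS =====
theorem pv_foldl_append (f : List Int → List Int) (l : List (List Int)) (acc : List (List Int)) :
    l.foldl (fun r it => r ++ [f it]) acc = acc ++ l.map f := by
  induction l generalizing acc with
  | nil => simp
  | cons x xs ih => simp [List.foldl, ih, List.append_assoc]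

theorem pv_zip_maps (f g h : List Int → Int) (l : List (List Int)) :
    ((l.map f).zip ((l.map g).zip (l.map h))).map (fun p => [p.1, p.2.1, p.2.2]) =
      l.map (fun it => [f it, g it, h it]) := by
  induction l with
  | nil => rfl
  | cons x xs ih => simp [List.map, List.zip_cons_cons, ih]

theorem pv_step_eq (item : List Int) :
    (let a := (PySem.List.pyGet? item 0).getD 0
     let b := (PySem.List.pyGet? item 1).getD 0
     if a = b then [(0:Int), 1, 0] else if a > b then [1, 0, 0] else [0, 0, 1]) =
    (let a := (PySem.List.pyGet? item 0).getD 0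
     let b := (PySem.List.pyGet? item 1).getD 0
     [if a > b then (1:Int) else 0, if a = b then 1 else 0, if a < b then 1 else 0]) := by
  dsimp only
  set a := (PySem.List.pyGet? item 0).getD 0
  set b := (PySem.List.pyGet? item 1).getD 0
  rcases lt_trichotomy a b with hc | hc | hc <;>
    simp [hc, ne_of_lt, ne_of_gt, not_lt_of_gt]

-- ===== VERDICT (by name: the statement is the Claim_ definition above) =====
theorem convert_one_hot_result_py_spec : Claim_equal_convert_one_hot_result_py := by
  intro sample_list _ _
  unfold Spec_convert_one_hot_result_py convert_one_hot_result_py convert_one_hot_result_py_alt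
  have hfold : sample_list.foldl (fun final_result item =>
      let a := (PySem.List.pyGet? item 0).getD 0
      let b := (PySem.List.pyGet? item 1).getD 0
      if a = b then final_result ++ [[0, 1, 0]]
      else if a > b then final_result ++ [[1, 0, 0]]
      else final_result ++ [[0, 0, 1]]) [] =
      sample_list.foldl (fun r it =>
        r ++ [let a := (PySem.List.pyGet? it 0).getD 0
              let b := (PySem.List.pyGet? it 1).getD 0
              if a = b then [(0:Int), 1, 0] else if a > b then [1, 0, 0] else [0, 0, 1]]) [] := by
    congr 1
    funext r it
    dsimp only
    split_ifs <;> rfl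
  rw [hfold, pv_foldl_append]
  simp only [List.nil_append]
  rw [pv_zip_maps]
  exact List.map_congr_left (fun it _ => pv_step_eq it)
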